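-- pv_equiv track=rewrite | github.com/sethgirvan/advent-of-code-2024 | 07/07.py | p2_exists_valid_equation
-- ===== SOURCE A (Python) =====
-- import math
--
-- def p2_exists_valid_equation(operands: list[int], result: int):
--     if len(operands) == 1:
--         return operands[0] == result
--
--     last = operands[-1]
--     mod = int(10 ** (int(math.log10(last)) + 1))
--     return (p2_exists_valid_equation(operands[:-1], result - last)
--             or (result % last == 0 and p2_exists_valid_equation(operands[:-1], result // last))
--             or (result % mod == last and p2_exists_valid_equation(operands[:-1], result // mod)))
-- ===== SOURCE B (Python) =====
-- import math
--
--
-- def p2_exists_valid_equation(operands: list[int], result: int):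
--     # Forward search: set of values reachable by evaluating left-to-right.
--     # A nonnegative value that already exceeds result can never come back down
--     # (all subsequent operands are positive), so it is pruned.
--     reachable = {operands[0]}
--     for op in operands[1:]:
--         mod = int(10 ** (int(math.log10(op)) + 1))
--         reachable = {w for v in reachable for w in (v + op, v * op, v * mod + op)
--                      if w <= result or w < 0}
--     return result in reachable
-- ===== Notes on version B (the rewrite author's own statement) =====
-- stated objective: alternative
-- what changed: Replaces A's backward recursion (peeling the last operand and inverting each operator via subtraction, exact-division and modulus tests) with a forward fold that maintains the deduplicated set of values reachable by +, * and digit-concatenation, pruning nonnegative values exceeding result, and finally tests membership of result.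
import Mathlib
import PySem

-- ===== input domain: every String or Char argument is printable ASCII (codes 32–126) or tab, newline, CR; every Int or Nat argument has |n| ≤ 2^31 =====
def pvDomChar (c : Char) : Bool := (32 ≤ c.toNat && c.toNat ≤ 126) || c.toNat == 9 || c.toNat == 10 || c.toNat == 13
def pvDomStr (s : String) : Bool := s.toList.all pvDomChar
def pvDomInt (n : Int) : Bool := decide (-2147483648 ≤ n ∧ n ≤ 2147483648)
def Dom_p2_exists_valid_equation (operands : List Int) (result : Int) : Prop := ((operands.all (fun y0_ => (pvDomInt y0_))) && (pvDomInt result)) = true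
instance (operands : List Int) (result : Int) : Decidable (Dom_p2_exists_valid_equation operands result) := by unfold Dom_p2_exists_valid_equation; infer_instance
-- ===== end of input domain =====

-- B replaces A's backward operator-inverting recursion by a forward fold maintaining the set of
-- reachable values (alternative decomposition, same asymptotic cost).


-- int(10 ** (int(math.log10(n)) + 1)): exact for 1 ≤ n (guaranteed by Pre_) on the Dom range,
-- where the float log10 is exact enough that int(log10 n) = Nat.log 10 n.
def pvPow10 (n : Int) : Int := 10 ^ (Nat.log 10 n.toNat + 1)

-- ===== PORT A =====
def p2_exists_valid_equation (operands : List Int) (result : Int) : Bool :=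
  if operands.length = 1 then
    operands.headD 0 == result          -- operands[0] (list is nonempty here)
  else
    match h : operands.getLast? with
    | none => false                      -- operands[-1] on []: Python IndexError; outside Pre_
    | some last =>
      let md : Int := pvPow10 last
      p2_exists_valid_equation operands.dropLast (result - last)
      || (PySem.Int.mod result last == 0 && p2_exists_valid_equation operands.dropLast (PySem.Int.floordiv result last))
      || (PySem.Int.mod result md == last && p2_exists_valid_equation operands.dropLast (PySem.Int.floordiv result md))
termination_by operands.length
decreasing_by
  all_goals
    cases operands with
    | nil => simp at h
    | cons a l => simp [List.length_dropLast]

-- ===== PORT B =====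
def p2_exists_valid_equation_alt (operands : List Int) (result : Int) : Bool :=
  match operands with
  | [] => false                          -- operands[0]: Python IndexError; outside Pre_
  | x :: rest =>
    let reachable := rest.foldl (fun s op =>
      let md : Int := pvPow10 op
      PySem.Set.ofList (((s : List Int).flatMap (fun v => [v + op, v * op, v * md + op])).filter
        (fun w => decide (w ≤ result) || decide (w < 0)))) (PySem.Set.ofList [x])
    PySem.Set.contains reachable result

-- ===== PRECONDITION & SPEC =====
-- Pre_ excludes exactly the inputs where Python A raises: the empty list (IndexError on
-- operands[-1]) and lists whose tail contains an operand ≤ 0 (math.log10 ValueError).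
def Pre_p2_exists_valid_equation (operands : List Int) (result : Int) : Prop :=
  operands ≠ [] ∧ ∀ y ∈ operands.tail, 1 ≤ y
instance (operands : List Int) (result : Int) : Decidable (Pre_p2_exists_valid_equation operands result) := by unfold Pre_p2_exists_valid_equation; infer_instance

def pvWitness_p2_exists_valid_equation : List Int × Int := ([3, 5, 2], 17)

def Spec_p2_exists_valid_equation (operands : List Int) (result : Int) (out : Bool) : Prop := out = p2_exists_valid_equation_alt operands result
instance (operands : List Int) (result : Int) (out : Bool) : Decidable (Spec_p2_exists_valid_equation operands result out) := by unfold Spec_p2_exists_valid_equation; infer_instance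

-- ===== CLAIM (what is proved, stated in full; the proofs are below) =====
def Claim_equal_p2_exists_valid_equation : Prop := ∀ (operands : List Int) (result : Int), Dom_p2_exists_valid_equation operands result → Pre_p2_exists_valid_equation operands result → Spec_p2_exists_valid_equation operands result (p2_exists_valid_equation operands result)

-- ===== LEMMAS AND PROOFS =====

-- the one step of B's fold
def pvStep (s : PySem.Set Int) (op : Int) : PySem.Set Int :=
  PySem.Set.union (PySem.Set.union (PySem.Set.ofList (s.map (· + op))) (s.map (· * op)))
    (s.map (fun v => v * pvPow10 op + op))

lemma pvPow10_pos (n : Int) : 0 < pvPow10 n := by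
  unfold pvPow10; positivity

lemma lt_pvPow10 (n : Int) (h : 1 ≤ n) : n < pvPow10 n := by
  unfold pvPow10
  have h1 : n.toNat < 10 ^ (Nat.log 10 n.toNat + 1) :=
    Nat.lt_pow_succ_log_self (by norm_num) _
  have h2 : (n.toNat : Int) = n := Int.toNat_of_nonneg (by omega)
  calc n = (n.toNat : Int) := h2.symm
    _ < ((10 ^ (Nat.log 10 n.toNat + 1) : Nat) : Int) := by exact_mod_cast h1
    _ = (10 : Int) ^ (Nat.log 10 n.toNat + 1) := by push_cast; ring

lemma mem_pvStep (s : PySem.Set Int) (op t : Int) :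
    t ∈ pvStep s op ↔ ∃ v ∈ s, v + op = t ∨ v * op = t ∨ v * pvPow10 op + op = t := by
  unfold pvStep
  simp only [PySem.Set.mem_union, PySem.Set.mem_ofList, List.mem_map]
  constructor
  · rintro ((⟨v, hv, he⟩ | ⟨v, hv, he⟩) | ⟨v, hv, he⟩) <;> exact ⟨v, hv, by tauto⟩
  · rintro ⟨v, hv, (he | he | he)⟩
    · exact Or.inl (Or.inl ⟨v, hv, he⟩)
    · exact Or.inl (Or.inr ⟨v, hv, he⟩)
    · exact Or.inr ⟨v, hv, he⟩

-- unfolding A's port on a list of length ≥ 2, presented as (x :: ops) ++ [last]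
lemma p2A_snoc (x : Int) (ops : List Int) (last t : Int) :
    p2_exists_valid_equation (x :: ops ++ [last]) t =
      (p2_exists_valid_equation (x :: ops) (t - last)
       || (PySem.Int.mod t last == 0 && p2_exists_valid_equation (x :: ops) (PySem.Int.floordiv t last))
       || (PySem.Int.mod t (pvPow10 last) == last && p2_exists_valid_equation (x :: ops) (PySem.Int.floordiv t (pvPow10 last)))) := by
  have hlast : (x :: ops ++ [last]).getLast? = some last := by
    rw [show x :: ops ++ [last] = (x :: ops) ++ [last] from rfl, List.getLast?_concat]
  have hdrop : (x :: ops ++ [last]).dropLast = x :: ops := by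
    rw [show x :: ops ++ [last] = (x :: ops) ++ [last] from rfl, List.dropLast_concat]
  rw [p2_exists_valid_equation]
  rw [if_neg (by simp)]
  split
  · rename_i heq
    rw [List.cons_append] at heq
    simp at heq
  · rename_i last' heq
    rw [hlast] at heq
    cases heq
    rw [hdrop]

-- the three operator inversions, valid for a positive operand
lemma exists_add_iff (S : List Int) (op t : Int) :
    (∃ v ∈ S, v + op = t) ↔ t - op ∈ S := by
  constructor
  · rintro ⟨v, hv, rfl⟩; simpa using hv
  · intro h; exact ⟨t - op, h, by ring⟩

lemma exists_mul_iff (S : List Int) (op t : Int) (h : 1 ≤ op) :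
    (∃ v ∈ S, v * op = t) ↔ (t % op = 0 ∧ t / op ∈ S) := by
  constructor
  · rintro ⟨v, hv, rfl⟩
    refine ⟨Int.mul_emod_left v op, ?_⟩
    rwa [Int.mul_ediv_cancel v (by omega)]
  · rintro ⟨h0, hm⟩
    exact ⟨t / op, hm, Int.ediv_mul_cancel (Int.dvd_of_emod_eq_zero h0)⟩

lemma exists_concat_iff (S : List Int) (op md t : Int) (h1 : 0 ≤ op) (h2 : op < md) :
    (∃ v ∈ S, v * md + op = t) ↔ (t % md = op ∧ t / md ∈ S) := by
  have hmd : (0:Int) < md := lt_of_le_of_lt h1 h2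
  constructor
  · rintro ⟨v, hv, rfl⟩
    constructor
    · rw [show v * md + op = op + md * v by ring, Int.add_mul_emod_self_left]
      exact Int.emod_eq_of_lt h1 h2
    · rw [show v * md + op = op + md * v by ring,
          Int.add_mul_ediv_left op v (by omega : md ≠ 0),
          Int.ediv_eq_zero_of_lt h1 h2, zero_add]
      exact hv
  · rintro ⟨h0, hm⟩
    refine ⟨t / md, hm, ?_⟩
    have h3 := Int.mul_ediv_add_emod t md
    rw [h0] at h3
    linear_combination h3

-- main invariant: A on (x :: ops) computes membership of the target in B's reachable set
lemma p2_main (ops : List Int) (hpos : ∀ y ∈ ops, 1 ≤ y) (x t : Int) :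
    p2_exists_valid_equation (x :: ops) t =
      PySem.Set.contains (ops.foldl pvStep (PySem.Set.ofList [x])) t := by
  induction ops using List.reverseRecOn generalizing t with
  | nil =>
    rw [p2_exists_valid_equation, Bool.eq_iff_iff]
    simp only [List.length_cons, List.length_nil, List.foldl_nil, if_pos,
      PySem.Set.contains_iff, PySem.Set.mem_ofList, List.headD, beq_iff_eq,
      List.mem_singleton]
    exact eq_comm
  | append_singleton ops last ih =>
    have hlast : 1 ≤ last := hpos last (by simp)
    have hops : ∀ y ∈ ops, 1 ≤ y := fun y hy => hpos y (by simp [hy])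
    have hmd : last < pvPow10 last := lt_pvPow10 last hlast
    rw [show x :: (ops ++ [last]) = x :: ops ++ [last] from rfl, p2A_snoc,
        List.foldl_append]
    simp only [List.foldl]
    set S := ops.foldl pvStep (PySem.Set.ofList [x]) with hS
    rw [ih hops, ih hops, ih hops]
    rw [PySem.Int.mod_eq_emod_of_pos (by omega : (0:Int) < last),
        PySem.Int.floordiv_eq_ediv_of_pos (by omega : (0:Int) < last),
        PySem.Int.mod_eq_emod_of_pos (pvPow10_pos last),
        PySem.Int.floordiv_eq_ediv_of_pos (pvPow10_pos last)]
    rw [Bool.eq_iff_iff]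
    simp only [Bool.or_eq_true, Bool.and_eq_true, beq_iff_eq, PySem.Set.contains_iff]
    rw [mem_pvStep]
    rw [show (∃ v ∈ S, v + last = t ∨ v * last = t ∨ v * pvPow10 last + last = t) ↔
          ((∃ v ∈ S, v + last = t) ∨ (∃ v ∈ S, v * last = t) ∨ (∃ v ∈ S, v * pvPow10 last + last = t)) by
      constructor
      · rintro ⟨v, hv, h | h | h⟩ <;> [exact Or.inl ⟨v, hv, h⟩; exact Or.inr (Or.inl ⟨v, hv, h⟩); exact Or.inr (Or.inr ⟨v, hv, h⟩)]
      · rintro (⟨v, hv, h⟩ | ⟨v, hv, h⟩ | ⟨v, hv, h⟩) <;> exact ⟨v, hv, by tauto⟩]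
    rw [exists_add_iff, exists_mul_iff S last t hlast,
        exists_concat_iff S last (pvPow10 last) t (by omega) hmd]
    tauto

-- B's pruned step, as a named function for the proofs (definitionally the lambda in the port)
def pvStepP (result : Int) (s : PySem.Set Int) (op : Int) : PySem.Set Int :=
  PySem.Set.ofList (((s : List Int).flatMap (fun v => [v + op, v * op, v * pvPow10 op + op])).filter
    (fun w => decide (w ≤ result) || decide (w < 0)))

lemma mem_pvStepP (result : Int) (s : PySem.Set Int) (op t : Int) :
    t ∈ pvStepP result s op ↔
      ((∃ v ∈ s, v + op = t ∨ v * op = t ∨ v * pvPow10 op + op = t) ∧ (t ≤ result ∨ t < 0)) := by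
  unfold pvStepP
  simp only [PySem.Set.mem_ofList, List.mem_filter, List.mem_flatMap, List.mem_cons,
    List.mem_singleton, List.not_mem_nil, or_false, Bool.or_eq_true, decide_eq_true_eq]
  constructor
  · rintro ⟨⟨v, hv, h⟩, hc⟩
    exact ⟨⟨v, hv, by tauto⟩, hc⟩
  · rintro ⟨⟨v, hv, h⟩, hc⟩
    exact ⟨⟨v, hv, by tauto⟩, hc⟩

-- a successor of a nonnegative value above result stays nonnegative and above result
lemma pv_cond_back (op v t result : Int) (hop : 1 ≤ op)
    (h : v + op = t ∨ v * op = t ∨ v * pvPow10 op + op = t)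
    (hc : t ≤ result ∨ t < 0) : v ≤ result ∨ v < 0 := by
  by_cases hv : v < 0
  · exact Or.inr hv
  · push_neg at hv
    have hmd : (1:Int) ≤ pvPow10 op := pvPow10_pos op
    have hvt : v ≤ t := by
      rcases h with h | h | h
      · omega
      · nlinarith
      · nlinarith
    left
    omega

-- pruning preserves membership of every value that itself passes the prune test
lemma pv_fold_prune (result : Int) (ops : List Int) (hpos : ∀ y ∈ ops, 1 ≤ y)
    (S S' : PySem.Set Int)
    (hR : ∀ w : Int, (w ≤ result ∨ w < 0) → (w ∈ S ↔ w ∈ S')) :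
    ∀ w : Int, (w ≤ result ∨ w < 0) →
      (w ∈ ops.foldl pvStep S ↔ w ∈ ops.foldl (pvStepP result) S') := by
  induction ops generalizing S S' with
  | nil => simpa using hR
  | cons op ops ih =>
    have hop : 1 ≤ op := hpos op (by simp)
    have hops : ∀ y ∈ ops, 1 ≤ y := fun y hy => hpos y (by simp [hy])
    simp only [List.foldl_cons]
    refine ih hops (pvStep S op) (pvStepP result S' op) ?_
    intro w hw
    rw [mem_pvStep, mem_pvStepP]
    constructor
    · rintro ⟨v, hv, h⟩
      have hvc := pv_cond_back op v w result hop h hw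
      exact ⟨⟨v, (hR v hvc).mp hv, h⟩, hw⟩
    · rintro ⟨⟨v, hv, h⟩, -⟩
      have hvc := pv_cond_back op v w result hop h hw
      exact ⟨v, (hR v hvc).mpr hv, h⟩

-- ===== VERDICT (by name: the statement is the Claim_ definition above) =====
theorem p2_exists_valid_equation_spec : Claim_equal_p2_exists_valid_equation := by
  intro operands result _ hpre
  unfold Spec_p2_exists_valid_equation
  obtain ⟨hne, hpos⟩ := hpre
  cases operands with
  | nil => exact absurd rfl hne
  | cons x rest =>
    rw [p2_exists_valid_equation_alt]
    show p2_exists_valid_equation (x :: rest) result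
        = PySem.Set.contains (rest.foldl (pvStepP result) (PySem.Set.ofList [x])) result
    rw [p2_main rest hpos x result, Bool.eq_iff_iff,
        PySem.Set.contains_iff, PySem.Set.contains_iff]
    exact pv_fold_prune result rest hpos _ _ (fun w _ => Iff.rfl) result (Or.inl le_rfl)
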